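-- pv_equiv track=rewrite | github.com/Code-Munkiz/ham | src/ham/ui_actions.py | _safe_nav_path
-- ===== SOURCE A (Python) =====
-- _ALLOWED_NAV_PREFIXES = (
--     "/",
--     "/chat",
--     "/settings",
--     "/droids",
--     "/runs",
--     "/logs",
--     "/activity",
--     "/analytics",
--     "/profiles",
--     "/extensions",
--     "/storage",
-- )
--
-- def _safe_nav_path(path: str) -> bool:
--     p = path.strip()
--     if not p.startswith("/") or p.startswith("//"):
--         return False
--     if ".." in p or "\n" in p or "\r" in p:
--         return False
--     base = p.split("?", 1)[0].split("#", 1)[0]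
--     if base == "/":
--         return True
--     return any(base == pref or base.startswith(pref + "/") for pref in _ALLOWED_NAV_PREFIXES if pref != "/")
-- ===== SOURCE B (Python) =====
-- _ALLOWED_NAV_SEGMENTS = frozenset({
--     "chat", "settings", "droids", "runs", "logs", "activity",
--     "analytics", "profiles", "extensions", "storage",
-- })
--
-- def _safe_nav_path(path: str) -> bool:
--     p = path.strip()
--     if ".." in p or "\n" in p or "\r" in p:
--         return False
--     if len(p) < 1 or p[0] != "/":
--         return False
--     if len(p) >= 2 and p[1] == "/":
--         return False
--     # single character scan: collect the first path component after the leading '/'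
--     seg = []
--     for c in p[1:]:
--         if c == "?" or c == "#" or c == "/":
--             break
--         seg.append(c)
--     if not seg:
--         # base is exactly "/" (next char is a query/fragment delimiter or the end)
--         return True
--     return "".join(seg) in _ALLOWED_NAV_SEGMENTS
-- ===== Notes on version B (the rewrite author's own statement) =====
-- stated objective: alternative
-- what changed: B replaces A's staged split('?')/split('#') base computation and the any-scan over the allowed-prefix tuple by a single character scan that collects the first path component after the leading '/' and tests it against a frozenset of route names.
import Mathlib
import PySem

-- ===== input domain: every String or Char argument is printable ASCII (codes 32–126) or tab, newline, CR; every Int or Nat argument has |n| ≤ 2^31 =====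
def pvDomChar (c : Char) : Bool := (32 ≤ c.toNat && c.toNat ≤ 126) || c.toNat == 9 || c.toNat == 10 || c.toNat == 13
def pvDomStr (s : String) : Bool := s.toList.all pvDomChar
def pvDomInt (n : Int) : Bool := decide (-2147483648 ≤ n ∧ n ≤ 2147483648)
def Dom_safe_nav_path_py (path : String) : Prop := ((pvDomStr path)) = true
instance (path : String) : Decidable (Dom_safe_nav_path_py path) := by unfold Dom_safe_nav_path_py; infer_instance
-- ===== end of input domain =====

-- B replaces A's staged splits and any-scan over the prefix tuple by one character scan collecting
-- the first path component, then a single set lookup; the return value is proved equal below.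

-- ===== PORT A =====
def navPrefixes : List String :=
  ["/", "/chat", "/settings", "/droids", "/runs", "/logs", "/activity",
   "/analytics", "/profiles", "/extensions", "/storage"]

def safe_nav_path_py (path : String) : Bool :=
  let p := PySem.Str.strip path
  if !PySem.Str.startswith p "/" || PySem.Str.startswith p "//" then false
  else if PySem.Str.isIn ".." p || PySem.Str.isIn "\n" p || PySem.Str.isIn "\r" p then false
  else
    -- base = p.split("?", 1)[0].split("#", 1)[0]; the [0] index is always in range (split never returns an empty list)
    let base := PySem.List.pyGetD ((PySem.Str.splitMax? (PySem.List.pyGetD ((PySem.Str.splitMax? p "?" 1).getD []) 0 "") "#" 1).getD []) 0 ""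
    if base == "/" then true
    else (navPrefixes.filter (fun pref => pref != "/")).any
           (fun pref => base == pref || PySem.Str.startswith base (pref ++ "/"))

-- ===== PORT B =====
def navSegments : PySem.Set String :=
  PySem.Set.ofList ["chat", "settings", "droids", "runs", "logs", "activity",
                    "analytics", "profiles", "extensions", "storage"]

-- the for-loop of Source B: walk the characters, accumulating until a delimiter breaks the loop
def collectSeg : List Char -> List Char -> List Char
  | [], acc => acc.reverse
  | c :: cs, acc =>
      if c == '?' || c == '#' || c == '/' then acc.reverse
      else collectSeg cs (c :: acc)

-- len(p) >= 2 and p[1] == "/", given the tail after p[0]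
def navSecondSlash : List Char -> Bool
  | [] => false
  | c1 :: _ => c1 == '/'

-- the positional checks (len(p) < 1 or p[0] != "/"; second char "/") and the scan, on p's characters
def navShape : List Char -> Bool
  | [] => false
  | c0 :: rest =>
    if c0 != '/' then false
    else if navSecondSlash rest then false
    else if (collectSeg rest []).isEmpty then true
    else PySem.Set.contains navSegments (String.ofList (collectSeg rest []))

def safe_nav_path_py_alt (path : String) : Bool :=
  let p := PySem.Str.strip path
  if PySem.Str.isIn ".." p || PySem.Str.isIn "\n" p || PySem.Str.isIn "\r" p then false
  else navShape p.toList

-- ===== PRECONDITION & SPEC =====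
def Spec_safe_nav_path_py (path : String) (out : Bool) : Prop := out = safe_nav_path_py_alt path
instance (path : String) (out : Bool) : Decidable (Spec_safe_nav_path_py path out) := by unfold Spec_safe_nav_path_py; infer_instance

-- ===== CLAIM (what is proved, stated in full; the proofs are below) =====
def Claim_equal_safe_nav_path_py : Prop := ∀ (path : String), Dom_safe_nav_path_py path → Spec_safe_nav_path_py path (safe_nav_path_py path)

-- ===== LEMMAS AND PROOFS =====

-- once maxsplit is exhausted and one piece is already accumulated, the head of the result is that first piece
lemma go_zero (d : Char) (fuel : Nat) (l cur x : List Char) (acc : List (List Char)) :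
    (PySem.Chars.splitOnMax.go [d] fuel 0 l cur (x :: acc)).headD [] = ((x :: acc).reverse).headD [] := by
  cases fuel with
  | zero => simp [PySem.Chars.splitOnMax.go]
  | succ n => cases l with
    | nil => simp [PySem.Chars.splitOnMax.go]
    | cons c rest => simp [PySem.Chars.splitOnMax.go]

-- the first piece of a single-character-separator split (maxsplit 1) is the longest separator-free prefix
lemma go_head (d : Char) : ∀ (fuel : Nat) (l cur : List Char), l.length < fuel →
    (PySem.Chars.splitOnMax.go [d] fuel 1 l cur []).headD [] = cur.reverse ++ l.takeWhile (fun c => c != d) := by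
  intro fuel
  induction fuel with
  | zero => intro l cur h; omega
  | succ n ih =>
    intro l cur h
    cases l with
    | nil => simp [PySem.Chars.splitOnMax.go]
    | cons c rest =>
      by_cases hc : c = d
      · subst hc
        rw [show PySem.Chars.splitOnMax.go [c] (n+1) 1 (c :: rest) cur [] =
            PySem.Chars.splitOnMax.go [c] n 0 (List.drop 1 (c :: rest)) [] [cur.reverse] from by
          simp [PySem.Chars.splitOnMax.go, List.isPrefixOf]]
        rw [go_zero]
        simp
      · rw [show PySem.Chars.splitOnMax.go [d] (n+1) 1 (c :: rest) cur [] =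
            PySem.Chars.splitOnMax.go [d] n 1 rest (c :: cur) [] from by
          simp [PySem.Chars.splitOnMax.go, List.isPrefixOf, Ne.symm hc]]
        rw [ih rest (c :: cur) (by simpa using Nat.lt_of_succ_lt_succ h)]
        simp [hc]

-- s.split(sep, 1)[0] for a one-character sep is the longest sep-free prefix of s
lemma split1_head (s sep : String) (d : Char) (hs : sep.toList = [d]) :
    PySem.List.pyGetD ((PySem.Str.splitMax? s sep 1).getD []) 0 "" =
      String.ofList (s.toList.takeWhile (fun c => c != d)) := by
  simp [PySem.Str.splitMax?, PySem.Chars.splitMax?, hs, PySem.Chars.splitOnMax,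
        PySem.List.pyGetD_zero]
  have h := go_head d (s.toList.length + 1) s.toList [] (by omega)
  simp at h
  have h0 : ∀ (l : List (List Char)), l[0]?.getD [] = l.head?.getD [] := by
    intro l; cases l <;> simp
  rw [h0, h]

lemma takeWhile_noslash (n : List Char) (hn : '/' ∉ n) :
    n.takeWhile (fun c => c != '/') = n := by
  induction n with
  | nil => simp
  | cons a as ih =>
    simp only [List.mem_cons, not_or] at hn
    simp [Ne.symm hn.1, ih hn.2]

lemma takeWhile_noslash_append (n : List Char) (hn : '/' ∉ n) (t : List Char) :
    (n ++ '/' :: t).takeWhile (fun c => c != '/') = n := by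
  induction n with
  | nil => simp
  | cons a as ih =>
    simp only [List.mem_cons, not_or] at hn
    simp only [List.cons_append, List.takeWhile_cons]
    simp [Ne.symm hn.1, ih hn.2]

-- 'rest equals n, or n followed by a slash starts rest' is exactly 'the first slash-free segment of rest is n'
lemma core (rest n : List Char) (hn : '/' ∉ n) :
    (rest = n ∨ n ++ ['/'] <+: rest) ↔ rest.takeWhile (fun c => c != '/') = n := by
  constructor
  · rintro (rfl | ⟨t, ht⟩)
    · exact takeWhile_noslash _ hn
    · rw [← ht, List.append_assoc, List.singleton_append]
      exact takeWhile_noslash_append n hn t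
  · intro h
    have hsplit := List.takeWhile_append_dropWhile (p := fun c => c != '/') (l := rest)
    rw [h] at hsplit
    cases hd : rest.dropWhile (fun c => c != '/') with
    | nil => left; rw [← hsplit, hd, List.append_nil]
    | cons c t =>
      have hc' : c = '/' := by
        have hne : rest.dropWhile (fun c => c != '/') ≠ [] := by rw [hd]; simp
        have := List.head_dropWhile_not (p := fun c => c != '/') (l := rest) hne
        have hh : (rest.dropWhile (fun c => c != '/')).head hne = c := by simp [hd]
        rw [hh] at this; simpa using this
      subst hc'
      exact Or.inr ⟨t, by rw [← hsplit, hd]; simp⟩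

-- one prefix test of A equals one segment-name comparison
lemma name_case (base : String) (rest : List Char) (hb : base.toList = '/' :: rest)
    (pre n : String) (hpre : pre.toList = '/' :: n.toList) (hn : '/' ∉ n.toList) :
    (base == pre || PySem.Str.startswith base (pre ++ "/")) =
      (String.ofList (rest.takeWhile (fun c => c != '/')) == n) := by
  rw [Bool.eq_iff_iff]
  simp only [Bool.or_eq_true, beq_iff_eq, PySem.Str.startswith_eq, PySem.Chars.startswith_iff]
  have h1 : base = pre ↔ rest = n.toList := by
    constructor
    · intro h; rw [h, hpre] at hb; exact (List.cons_injective.eq_iff.mp hb.symm)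
    · intro h; apply String.toList_injective; rw [hb, hpre, h]
  have h2 : (pre ++ "/").toList <+: base.toList ↔ n.toList ++ ['/'] <+: rest := by
    rw [String.toList_append, hpre, hb,
        show ('/' :: n.toList) ++ "/".toList = '/' :: (n.toList ++ ['/']) from by simp,
        List.cons_prefix_cons]
    simp
  have h3 : String.ofList (rest.takeWhile (fun c => c != '/')) = n ↔
      rest.takeWhile (fun c => c != '/') = n.toList := by
    constructor
    · intro h; rw [← h]; simp
    · intro h; apply String.toList_injective; simpa using h
  rw [h1, h2, h3, ← core rest n.toList hn]

-- the whole any-scan over (prefix, segment) pairs equals the membership test of the first segment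
lemma any_pairs (base : String) (rest : List Char) (hb : base.toList = '/' :: rest) :
    ∀ (ps : List (String × String)),
      (∀ q ∈ ps, q.1.toList = '/' :: q.2.toList ∧ '/' ∉ q.2.toList) →
      (ps.map Prod.fst).any (fun pref => base == pref || PySem.Str.startswith base (pref ++ "/")) =
        (ps.map Prod.snd).contains (String.ofList (rest.takeWhile (fun c => c != '/'))) := by
  intro ps
  induction ps with
  | nil => intro _; simp
  | cons q qs ih =>
    intro h
    obtain ⟨hq, hqs⟩ := List.forall_mem_cons.mp h
    simp only [List.map_cons, List.any_cons, List.contains_cons]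
    rw [name_case base rest hb q.1 q.2 hq.1 hq.2, ih hqs]

-- the prefix list of A and the segment set, as the fst/snd projections of one pair list
def navPairs : List (String × String) :=
  [("/chat", "chat"), ("/settings", "settings"), ("/droids", "droids"), ("/runs", "runs"),
   ("/logs", "logs"), ("/activity", "activity"), ("/analytics", "analytics"),
   ("/profiles", "profiles"), ("/extensions", "extensions"), ("/storage", "storage")]

-- Source B's loop collects the longest delimiter-free prefix
lemma collectSeg_eq : ∀ (l acc : List Char),
    collectSeg l acc = acc.reverse ++ l.takeWhile (fun c => !(c == '?' || c == '#' || c == '/')) := by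
  intro l
  induction l with
  | nil => intro acc; simp [collectSeg]
  | cons c cs ih =>
    intro acc
    by_cases hc : (c == '?' || c == '#' || c == '/') = true
    · have hc2 := hc
      simp only [Bool.or_eq_true, beq_iff_eq] at hc2
      rcases hc2 with ((h | h) | h) <;> subst h <;> simp [collectSeg]
    · simp only [collectSeg, hc, ih, List.takeWhile_cons]
      simp at hc
      simp

lemma takeWhile_comp (l : List Char) :
    (((l.takeWhile (fun c => c != '?')).takeWhile (fun c => c != '#')).takeWhile (fun c => c != '/')) =
      l.takeWhile (fun c => !(c == '?' || c == '#' || c == '/')) := by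
  rw [List.takeWhile_takeWhile, List.takeWhile_takeWhile]
  congr 1
  funext c
  cases h1 : c == '?' <;> cases h2 : c == '#' <;> cases h3 : c == '/' <;> simp_all

-- startswith on a cons cell, single- and two-character needles
lemma sw_single (c d : Char) (l : List Char) :
    PySem.Chars.startswith (c :: l) [d] = (c == d) := by
  rw [Bool.eq_iff_iff, PySem.Chars.startswith_iff]
  simp only [List.cons_prefix_cons, List.nil_prefix, and_true, beq_iff_eq]
  exact eq_comm

lemma sw_double (c1 c2 d1 d2 : Char) (l : List Char) :
    PySem.Chars.startswith (c1 :: c2 :: l) [d1, d2] = (c1 == d1 && c2 == d2) := by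
  rw [Bool.eq_iff_iff, PySem.Chars.startswith_iff]
  simp only [List.cons_prefix_cons, List.nil_prefix, and_true, beq_iff_eq, Bool.and_eq_true]
  constructor
  · rintro ⟨a, b⟩; exact ⟨a.symm, b.symm⟩
  · rintro ⟨a, b⟩; exact ⟨a.symm, b.symm⟩

lemma sw_short (c d1 d2 : Char) : PySem.Chars.startswith [c] [d1, d2] = false := by
  rw [Bool.eq_false_iff]
  intro h
  rw [PySem.Chars.startswith_iff] at h
  simpa using h.length_le

lemma sw_nil (d : Char) : PySem.Chars.startswith [] [d] = false := by
  rw [Bool.eq_false_iff]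
  intro h
  rw [PySem.Chars.startswith_iff] at h
  simpa using h.length_le

-- ===== VERDICT (by name: the statement is the Claim_ definition above) =====
theorem safe_nav_path_py_spec : Claim_equal_safe_nav_path_py := by
  intro path _
  unfold Spec_safe_nav_path_py safe_nav_path_py safe_nav_path_py_alt
  simp only []
  set p := PySem.Str.strip path with hp
  by_cases hc : (PySem.Str.isIn ".." p || PySem.Str.isIn "\n" p || PySem.Str.isIn "\r" p) = true
  · -- the content guard rejects on both sides (A possibly already rejected on the shape guard)
    simp only [if_pos hc]
    by_cases h1 : (!PySem.Str.startswith p "/" || PySem.Str.startswith p "//") = true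
    · rw [if_pos h1]
    · rw [if_neg h1]
  · simp only [if_neg hc]
    cases hl : p.toList with
    | nil =>
      have h1 : (!PySem.Str.startswith p "/" || PySem.Str.startswith p "//") = true := by
        have e1 : PySem.Str.startswith p "/" = false := by
          rw [PySem.Str.startswith_eq, show ("/" : String).toList = ['/'] from rfl, hl, sw_nil]
        rw [e1]
        rfl
      rw [if_pos h1]
      simp [navShape]
    | cons c0 rest =>
      simp only [navShape]
      by_cases hc0 : c0 = '/'
      · subst hc0
        cases hrest : rest with
        | nil =>
          -- p = "/"
          have hl2 : p.toList = ['/'] := by rw [hl, hrest]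
          have h1 : (!PySem.Str.startswith p "/" || PySem.Str.startswith p "//") = false := by
            have e1 : PySem.Str.startswith p "/" = true := by
              rw [PySem.Str.startswith_eq, show ("/" : String).toList = ['/'] from rfl, hl2,
                  sw_single]
              rfl
            have e2 : PySem.Str.startswith p "//" = false := by
              rw [PySem.Str.startswith_eq, show ("//" : String).toList = ['/', '/'] from rfl, hl2,
                  sw_short]
            rw [e1, e2]
            rfl
          rw [if_neg (by rw [h1]; exact Bool.false_ne_true)]
          have hbase : PySem.List.pyGetD ((PySem.Str.splitMax? (PySem.List.pyGetD ((PySem.Str.splitMax? p "?" 1).getD []) 0 "") "#" 1).getD []) 0 "" = "/" := by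
            rw [split1_head _ "?" '?' rfl, split1_head _ "#" '#' rfl]
            simp [hl, hrest]
          rw [hbase, if_pos (by decide)]
          decide
        | cons c1 rest2 =>
          have hl2 : p.toList = '/' :: c1 :: rest2 := by rw [hl, hrest]
          by_cases hc1 : c1 = '/'
          · subst hc1
            have h1 : (!PySem.Str.startswith p "/" || PySem.Str.startswith p "//") = true := by
              have e2 : PySem.Str.startswith p "//" = true := by
                rw [PySem.Str.startswith_eq, show ("//" : String).toList = ['/', '/'] from rfl,
                    hl2, sw_double]
                rfl
              rw [e2]
              simp
            rw [if_pos h1, if_neg (by decide), if_pos (by simp [navSecondSlash])]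
          · -- main case: p = '/' :: c1 :: rest2 with c1 ≠ '/'
            have h1 : (!PySem.Str.startswith p "/" || PySem.Str.startswith p "//") = false := by
              have e1 : PySem.Str.startswith p "/" = true := by
                rw [PySem.Str.startswith_eq, show ("/" : String).toList = ['/'] from rfl, hl2,
                    sw_single]
                rfl
              have e2 : PySem.Str.startswith p "//" = false := by
                rw [PySem.Str.startswith_eq, show ("//" : String).toList = ['/', '/'] from rfl,
                    hl2, sw_double]
                simp [hc1]
              rw [e1, e2]
              rfl
            rw [if_neg (by rw [h1]; exact Bool.false_ne_true)]
            -- both sides now talk about the first path component after the leading '/'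
            rw [split1_head _ "?" '?' rfl, split1_head _ "#" '#' rfl]
            set base := String.ofList ((((String.ofList (p.toList.takeWhile (fun c => c != '?'))).toList).takeWhile (fun c => c != '#'))) with hbdef
            have hbase : base.toList = '/' :: (((c1 :: rest2).takeWhile (fun c => c != '?')).takeWhile (fun c => c != '#')) := by
              rw [hbdef]
              simp [hl2]
            have hseg : collectSeg (c1 :: rest2) [] =
                (((c1 :: rest2).takeWhile (fun c => c != '?')).takeWhile (fun c => c != '#')).takeWhile (fun c => c != '/') := by
              rw [collectSeg_eq, takeWhile_comp]; simp
            by_cases hb : (base == "/") = true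
            · -- base == "/" iff the collected segment is empty (the char after '/' is a delimiter, not '/')
              rw [if_pos hb, if_neg (by decide), if_neg (by simp [navSecondSlash, hc1])]
              have hw : (((c1 :: rest2).takeWhile (fun c => c != '?')).takeWhile (fun c => c != '#')) = [] := by
                have := congrArg String.toList (beq_iff_eq.mp hb)
                rw [hbase] at this
                simpa using this
              rw [if_pos (by rw [hseg, hw]; rfl)]
            · rw [if_neg hb, if_neg (by decide), if_neg (by simp [navSecondSlash, hc1])]
              have hw : (((c1 :: rest2).takeWhile (fun c => c != '?')).takeWhile (fun c => c != '#')) ≠ [] := by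
                intro h
                apply hb
                rw [beq_iff_eq]
                apply String.toList_injective
                rw [hbase, h]; rfl
              have hne : (collectSeg (c1 :: rest2) []).isEmpty = false := by
                rw [hseg]
                cases hcase : (((c1 :: rest2).takeWhile (fun c => c != '?')).takeWhile (fun c => c != '#')) with
                | nil => exact absurd hcase hw
                | cons a as =>
                  have hpre2 : a :: as <+: c1 :: rest2 := by
                    rw [← hcase]
                    exact (List.takeWhile_prefix _).trans (List.takeWhile_prefix _)
                  have ha : a ≠ '/' := by
                    obtain ⟨t, ht⟩ := hpre2
                    have : a = c1 := by
                      have := congrArg (List.headD · ' ') ht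
                      simpa using this
                    rw [this]; exact hc1
                  simp [ha]
              rw [if_neg (by rw [hne]; simp)]
              have hmain := any_pairs base (((c1 :: rest2).takeWhile (fun c => c != '?')).takeWhile (fun c => c != '#')) hbase navPairs (by decide)
              rw [show navPrefixes.filter (fun pref => pref != "/") = navPairs.map Prod.fst from by decide]
              rw [hmain, hseg]
              rw [show navPairs.map Prod.snd = navSegments from by decide]
              rfl
      · have h1 : (!PySem.Str.startswith p "/" || PySem.Str.startswith p "//") = true := by
          have e1 : PySem.Str.startswith p "/" = false := by
            rw [PySem.Str.startswith_eq, show ("/" : String).toList = ['/'] from rfl, hl,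
                sw_single]
            simp [hc0]
          rw [e1]
          rfl
        rw [if_pos h1, if_pos (by simp [hc0])]
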